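-- pv_equiv track=rewrite | github.com/JoaquinCardonaRuiz/thesis-compositionality | LEAR/DeAR_experiment/model.py | sort_bottom_up
-- ===== SOURCE A (Python) =====
-- def sort_bottom_up(pairs):
--     """ Sort dependent pairs in a bottom-up manner.
--
--     This is so the tree can be traversed bottom-up and no parent is visited before its children.
--     """
--     # Build parent mapping and collect children
--     parent_map = {dep: head for head, dep in pairs if head != dep}
--     def get_depth(node):
--         depth = 0
--         while node in parent_map and node != parent_map[node]:
--             node = parent_map[node]
--             depth += 1
--         return depth
--
--     # Sort pairs by depth of the dependent node
--     pairs_no_root = [pair for pair in pairs if pair[0] != pair[1]]  # exclude root self-pair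
--     return sorted(pairs_no_root, key=lambda pair: get_depth(pair[1]), reverse=True)
-- ===== SOURCE B (Python) =====
-- def sort_bottom_up(pairs):
--     """ Sort dependent pairs in a bottom-up manner.
--
--     Same result as the original, but node depths are memoized along parent
--     chains (each node's depth is computed once), instead of re-walking the
--     whole chain for every pair.
--     """
--     parent = {dep: head for head, dep in pairs if head != dep}
--     depth = {}
--     for node in parent:
--         # climb until we hit a cached node or leave the tree, remembering the path
--         chain = []
--         cur = node
--         while cur in parent and cur not in depth:
--             chain.append(cur)
--             cur = parent[cur]
--         d = depth.get(cur, 0)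
--         # cache depths back down the path
--         while chain:
--             d += 1
--             depth[chain.pop()] = d
--     rest = [p for p in pairs if p[0] != p[1]]
--     return sorted(rest, key=lambda p: depth.get(p[1], 0), reverse=True)
-- ===== Notes on version B (the rewrite author's own statement) =====
-- stated objective: alternative
-- what changed: B memoizes node depths in a dict, caching results along every parent chain it walks (each node's depth is computed once), instead of re-walking the full parent chain for every pair; the stable reverse sort is unchanged.
import Mathlib
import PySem

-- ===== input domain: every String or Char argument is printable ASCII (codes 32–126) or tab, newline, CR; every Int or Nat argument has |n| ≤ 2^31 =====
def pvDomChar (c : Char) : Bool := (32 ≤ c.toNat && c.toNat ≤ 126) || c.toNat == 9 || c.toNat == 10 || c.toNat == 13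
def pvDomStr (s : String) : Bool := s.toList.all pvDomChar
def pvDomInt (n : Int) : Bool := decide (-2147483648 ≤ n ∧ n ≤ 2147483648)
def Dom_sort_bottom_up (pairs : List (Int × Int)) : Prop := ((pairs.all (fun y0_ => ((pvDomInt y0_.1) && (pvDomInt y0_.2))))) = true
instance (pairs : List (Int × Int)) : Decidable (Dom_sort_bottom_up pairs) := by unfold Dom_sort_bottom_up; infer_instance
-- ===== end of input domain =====

-- B memoizes node depths along parent chains (each node's depth computed once) instead
-- of re-walking the whole parent chain for every pair; same stable sort, same result.

-- ===== PORT A =====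
-- parent_map = {dep: head for head, dep in pairs if head != dep}
def pvParentA (pairs : List (Int × Int)) : PySem.Dict Int Int :=
  pairs.foldl (fun d p => if p.1 ≠ p.2 then d.insert p.2 p.1 else d) PySem.Dict.empty

-- get_depth's while loop; fuel (pairs.length + 1) only makes the loop total:
-- under Pre_ every parent chain leaves the key set within pairs.length steps.
def pvGetDepth (pm : PySem.Dict Int Int) : Nat → Int → Int
  | 0, _ => 0
  | f + 1, node =>
    match pm.get? node with
    | none => 0
    | some p => if node = p then 0 else 1 + pvGetDepth pm f p

def sort_bottom_up (pairs : List (Int × Int)) : List (Int × Int) :=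
  let pm := pvParentA pairs
  let pairs_no_root := pairs.filter (fun p => p.1 ≠ p.2)
  PySem.List.sorted pairs_no_root (fun p => pvGetDepth pm (pairs.length + 1) p.2) true

-- ===== PORT B =====
-- parent = {dep: head for head, dep in pairs if head != dep}
def pvParentB (pairs : List (Int × Int)) : PySem.Dict Int Int :=
  pairs.foldl (fun d p => if p.1 ≠ p.2 then d.insert p.2 p.1 else d) PySem.Dict.empty

-- the climbing while loop: collect the uncached chain, return (chain, cur);
-- fuel as in port A; 'pm.getD cur cur' is parent[cur] (cur is a key here)
def pvWalk (pm D : PySem.Dict Int Int) : Nat → Int → List Int → List Int × Int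
  | 0, cur, chain => (chain, cur)
  | f + 1, cur, chain =>
    if pm.contains cur && !(D.contains cur) then
      pvWalk pm D f (pm.getD cur cur) (chain ++ [cur])
    else (chain, cur)

-- 'while chain: d += 1; depth[chain.pop()] = d' — recursion over the reversed chain
def pvCache : PySem.Dict Int Int → Int → List Int → PySem.Dict Int Int
  | D, _, [] => D
  | D, d, n :: rest => pvCache (D.insert n (d + 1)) (d + 1) rest

def sort_bottom_up_alt (pairs : List (Int × Int)) : List (Int × Int) :=
  let pm := pvParentB pairs
  let depthD := pm.keys.foldl (fun D node =>
    let ws := pvWalk pm D (pairs.length + 1) node []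
    pvCache D (D.getD ws.2 0) ws.1.reverse) PySem.Dict.empty
  let rest := pairs.filter (fun p => p.1 ≠ p.2)
  PySem.List.sorted rest (fun p => depthD.getD p.2 0) true

-- ===== PRECONDITION & SPEC =====
-- the parent map as A builds it (self-contained copy for the precondition)
def pvParentPre (pairs : List (Int × Int)) : PySem.Dict Int Int :=
  pairs.foldl (fun d p => if p.1 ≠ p.2 then d.insert p.2 p.1 else d) PySem.Dict.empty

-- k steps up the parent chain (a non-key is a fixed point)
def pvIter (pm : PySem.Dict Int Int) : Nat → Int → Int
  | 0, n => n
  | k + 1, n => pvIter pm k (pm.getD n n)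

-- Pre_ excludes inputs whose parent links form a cycle: there A's (and B's)
-- while loop never terminates, so A returns on exactly the inputs admitted here.
def Pre_sort_bottom_up (pairs : List (Int × Int)) : Prop :=
  ∀ n ∈ (pvParentPre pairs).keys,
    (pvParentPre pairs).contains (pvIter (pvParentPre pairs) pairs.length n) = false

instance (pairs : List (Int × Int)) : Decidable (Pre_sort_bottom_up pairs) := by
  unfold Pre_sort_bottom_up; infer_instance

def pvWitness_sort_bottom_up : (List (Int × Int)) := [(0, 1), (1, 2), (0, 3)]

def Spec_sort_bottom_up (pairs : List (Int × Int)) (out : List (Int × Int)) : Prop := out = sort_bottom_up_alt pairs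
instance (pairs : List (Int × Int)) (out : List (Int × Int)) : Decidable (Spec_sort_bottom_up pairs out) := by unfold Spec_sort_bottom_up; infer_instance

-- ===== CLAIM (what is proved, stated in full; the proofs are below) =====
def Claim_equal_sort_bottom_up : Prop := ∀ (pairs : List (Int × Int)), Dom_sort_bottom_up pairs → Pre_sort_bottom_up pairs → Spec_sort_bottom_up pairs (sort_bottom_up pairs)

-- ===== LEMMAS AND PROOFS =====

-- proof-only helpers: the walk's chain and stop, its chain structure, and memo correctness
def pvPath (pm D : PySem.Dict Int Int) : Nat → Int → List Int
  | 0, _ => []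
  | f + 1, cur =>
    if pm.contains cur && !(D.contains cur) then cur :: pvPath pm D f (pm.getD cur cur) else []

def pvStop (pm D : PySem.Dict Int Int) : Nat → Int → Int
  | 0, cur => cur
  | f + 1, cur =>
    if pm.contains cur && !(D.contains cur) then pvStop pm D f (pm.getD cur cur) else cur

def pvRevChain (pm : PySem.Dict Int Int) : List Int → Int → Prop
  | [], _ => True
  | n :: rest, t => pm.get? n = some t ∧ pvRevChain pm rest n

def pvGood (pm : PySem.Dict Int Int) (K : Nat) (D : PySem.Dict Int Int) : Prop :=
  ∀ k v, D.get? k = some v → v = pvGetDepth pm (K + 1) k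

theorem pv_parent_ne (pairs : List (Int × Int)) (D : PySem.Dict Int Int)
    (hD : ∀ k v, D.get? k = some v → v ≠ k) :
    ∀ k v, (pairs.foldl (fun d p => if p.1 ≠ p.2 then d.insert p.2 p.1 else d) D).get? k = some v → v ≠ k := by
  induction pairs generalizing D with
  | nil => exact hD
  | cons p rest ih =>
    intro k v h
    refine ih _ ?_ k v h
    intro k v hkv
    by_cases hp : p.1 ≠ p.2
    · simp only [if_pos hp, PySem.Dict.get?_insert] at hkv
      split at hkv
      · next heq => cases hkv; subst heq; exact hp
      · exact hD _ _ hkv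
    · simp only [if_neg hp] at hkv; exact hD _ _ hkv

theorem pv_parent_contains (pairs : List (Int × Int)) (x : Int × Int) (D : PySem.Dict Int Int)
    (h : (x ∈ pairs ∧ x.1 ≠ x.2) ∨ D.contains x.2 = true) :
    (pairs.foldl (fun d p => if p.1 ≠ p.2 then d.insert p.2 p.1 else d) D).contains x.2 = true := by
  induction pairs generalizing D with
  | nil =>
    rcases h with ⟨h, _⟩ | h
    · cases h
    · simpa using h
  | cons p rest ih =>
    simp only [List.foldl_cons]
    rcases h with ⟨hmem, hne⟩ | hc
    · rcases List.mem_cons.1 hmem with rfl | hmem'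
      · refine ih _ (Or.inr ?_)
        simp [if_pos hne]
      · exact ih _ (Or.inl ⟨hmem', hne⟩)
    · refine ih _ (Or.inr ?_)
      by_cases hp : p.1 ≠ p.2
      · simp [if_pos hp, PySem.Dict.contains_insert, hc]
      · simpa [if_neg hp] using hc

theorem pv_iter_fix (pm : PySem.Dict Int Int) (k : Nat) (n : Int)
    (h : pm.contains n = false) : pvIter pm k n = n := by
  induction k with
  | zero => rfl
  | succ k ih => simp [pvIter, PySem.Dict.getD_of_not_contains pm n h, ih]

-- fuel stability: once the chain from `n` escapes within k steps, more fuel changes nothing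
theorem pv_depth_stable (pm : PySem.Dict Int Int) :
    ∀ (k f : Nat) (n : Int), pm.contains (pvIter pm k n) = false → k ≤ f →
      pvGetDepth pm f n = pvGetDepth pm k n := by
  intro k
  induction k with
  | zero =>
    intro f n hesc _
    simp only [pvIter] at hesc
    have hg : pm.get? n = none := by
      rw [PySem.Dict.contains_eq_isSome_get?] at hesc
      exact Option.not_isSome_iff_eq_none.1 (by simp [hesc])
    cases f with
    | zero => rfl
    | succ f => simp [pvGetDepth, hg]
  | succ k ih =>
    intro f n hesc hle
    cases f with
    | zero => omega
    | succ f =>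
      cases hg : pm.get? n with
      | none => simp [pvGetDepth, hg]
      | some p =>
        have hc : pm.contains n = true := by
          rw [PySem.Dict.contains_eq_isSome_get?, hg]; rfl
        have hgd : pm.getD n n = p := by
          rw [PySem.Dict.getD_eq_get?_getD, hg]; rfl
        have hesc' : pm.contains (pvIter pm k p) = false := by
          simpa [pvIter, hgd] using hesc
        simp [pvGetDepth, hg, ih f p hesc' (by omega)]

-- the depth recurrence, at the fixed fuel K + 1, given global escape
theorem pv_depth_rec (pm : PySem.Dict Int Int) (K : Nat)
    (hesc : ∀ n, pm.contains (pvIter pm K n) = false)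
    (hne : ∀ k v, pm.get? k = some v → v ≠ k)
    (c p : Int) (hg : pm.get? c = some p) :
    pvGetDepth pm (K + 1) c = 1 + pvGetDepth pm (K + 1) p := by
  have hpc : ¬ (c = p) := fun h => (hne c p hg) (h ▸ rfl)
  have h1 : pvGetDepth pm (K + 1) c = 1 + pvGetDepth pm K p := by
    simp [pvGetDepth, hg, hpc]
  rw [h1, pv_depth_stable pm K (K + 1) p (hesc p) (by omega)]

theorem pv_walk_eq (pm D : PySem.Dict Int Int) :
    ∀ (f : Nat) (cur : Int) (acc : List Int),
      pvWalk pm D f cur acc = (acc ++ pvPath pm D f cur, pvStop pm D f cur) := by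
  intro f
  induction f with
  | zero => intro cur acc; simp [pvWalk, pvPath, pvStop]
  | succ f ih =>
    intro cur acc
    by_cases h : pm.contains cur && !(D.contains cur)
    · simp [pvWalk, pvPath, pvStop, h, ih]
    · simp [pvWalk, pvPath, pvStop, h]

theorem pv_stop_ok (pm D : PySem.Dict Int Int) :
    ∀ (k f : Nat) (cur : Int), pm.contains (pvIter pm k cur) = false → k ≤ f →
      pm.contains (pvStop pm D f cur) = false ∨ D.contains (pvStop pm D f cur) = true := by
  intro k
  induction k with
  | zero =>
    intro f cur hesc _
    simp only [pvIter] at hesc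
    cases f with
    | zero => exact Or.inl hesc
    | succ f => simp [pvStop, hesc]
  | succ k ih =>
    intro f cur hesc hle
    cases f with
    | zero => omega
    | succ f =>
    cases hc : pm.contains cur with
    | false =>
      left
      simp [pvStop, hc]
    | true =>
      cases hd : D.contains cur with
      | true => simp [pvStop, hc, hd]
      | false =>
        have hesc' : pm.contains (pvIter pm k (pm.getD cur cur)) = false := by
          simpa [pvIter] using hesc
        simpa [pvStop, hc, hd] using ih f (pm.getD cur cur) hesc' (by omega)

theorem pv_path_rev (pm D : PySem.Dict Int Int) :
    ∀ (f : Nat) (cur : Int) (acc : List Int), pvRevChain pm acc cur →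
      pvRevChain pm ((pvPath pm D f cur).reverse ++ acc) (pvStop pm D f cur) := by
  intro f
  induction f with
  | zero => intro cur acc h; simpa [pvPath, pvStop] using h
  | succ f ih =>
    intro cur acc h
    by_cases hb : pm.contains cur && !(D.contains cur)
    · have hc : pm.contains cur = true := by
        have := hb
        simp only [Bool.and_eq_true] at this
        exact this.1
      have hg : pm.get? cur = some (pm.getD cur cur) := by
        rw [PySem.Dict.contains_eq_isSome_get?] at hc
        rcases Option.isSome_iff_exists.1 hc with ⟨v, hv⟩
        rw [PySem.Dict.getD_eq_get?_getD, hv]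
        simp
      have := ih (pm.getD cur cur) (cur :: acc) ⟨hg, h⟩
      simpa [pvPath, pvStop, hb] using this
    · simpa [pvPath, pvStop, hb] using h

theorem pv_cache_good (pm : PySem.Dict Int Int) (K : Nat)
    (hesc : ∀ n, pm.contains (pvIter pm K n) = false)
    (hne : ∀ k v, pm.get? k = some v → v ≠ k) :
    ∀ (rs : List Int) (D : PySem.Dict Int Int) (d t : Int),
      pvGood pm K D → pvRevChain pm rs t → d = pvGetDepth pm (K + 1) t →
      pvGood pm K (pvCache D d rs) ∧
      (∀ m, (m ∈ rs ∨ D.contains m = true) → (pvCache D d rs).contains m = true) := by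
  intro rs
  induction rs with
  | nil =>
    intro D d t hG _ _
    refine ⟨hG, ?_⟩
    intro m hm
    rcases hm with hm | hm
    · cases hm
    · exact hm
  | cons n rest ih =>
    intro D d t hG hchain hd
    rcases hchain with ⟨hg, hrest⟩
    have hdn : d + 1 = pvGetDepth pm (K + 1) n := by
      rw [pv_depth_rec pm K hesc hne n t hg, hd]; ring
    have hG' : pvGood pm K (D.insert n (d + 1)) := by
      intro k v hkv
      rw [PySem.Dict.get?_insert] at hkv
      split at hkv
      · next heq => cases hkv; subst heq; exact hdn
      · exact hG _ _ hkv
    have hrec := ih (D.insert n (d + 1)) (d + 1) n hG' hrest hdn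
    refine ⟨hrec.1, ?_⟩
    intro m hm
    simp only [pvCache]
    refine hrec.2 m ?_
    rcases hm with hm | hm
    · rcases List.mem_cons.1 hm with rfl | hm'
      · exact Or.inr (by simp)
      · exact Or.inl hm'
    · exact Or.inr (by simp [PySem.Dict.contains_insert, hm])

-- one iteration of B's memoizing loop
theorem pv_process_good (pm : PySem.Dict Int Int) (K : Nat)
    (hesc : ∀ n, pm.contains (pvIter pm K n) = false)
    (hne : ∀ k v, pm.get? k = some v → v ≠ k)
    (D : PySem.Dict Int Int) (node : Int) (hG : pvGood pm K D) :
    pvGood pm K (pvCache D (D.getD (pvStop pm D (K + 1) node) 0) (pvPath pm D (K + 1) node).reverse) ∧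
    (∀ m, (pm.contains node = true ∧ m = node) ∨ D.contains m = true →
      (pvCache D (D.getD (pvStop pm D (K + 1) node) 0) (pvPath pm D (K + 1) node).reverse).contains m = true) := by
  set stop := pvStop pm D (K + 1) node with hstop
  have hd0 : D.getD stop 0 = pvGetDepth pm (K + 1) stop := by
    rcases pv_stop_ok pm D K (K + 1) node (hesc node) (by omega) with hout | hin
    · have hg : pm.get? stop = none := by
        rw [PySem.Dict.contains_eq_isSome_get?, ← hstop] at hout
        exact Option.not_isSome_iff_eq_none.1 (by simp [hout])
      rw [PySem.Dict.getD_eq_get?_getD]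
      cases hD : D.get? stop with
      | none => simp [pvGetDepth, hg]
      | some v => simp [hG stop v hD]
    · rw [PySem.Dict.contains_eq_isSome_get?] at hin
      rcases Option.isSome_iff_exists.1 hin with ⟨v, hv⟩
      rw [PySem.Dict.getD_eq_get?_getD, hv]
      simpa using hG stop v hv
  have hchain : pvRevChain pm (pvPath pm D (K + 1) node).reverse stop := by
    simpa using pv_path_rev pm D (K + 1) node [] trivial
  have hmain := pv_cache_good pm K hesc hne (pvPath pm D (K + 1) node).reverse D
      (D.getD stop 0) stop hG hchain hd0
  refine ⟨hmain.1, ?_⟩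
  intro m hm
  rcases hm with ⟨hc, rfl⟩ | hin
  · by_cases hD : D.contains m = true
    · exact hmain.2 m (Or.inr hD)
    · have hDf : D.contains m = false := by
        revert hD; cases D.contains m <;> simp
      have hpath : m ∈ pvPath pm D (K + 1) m := by
        simp [pvPath, hc, hDf]
      exact hmain.2 m (Or.inl (by simpa using hpath))
  · exact hmain.2 m (Or.inr hin)

-- the whole memoizing fold caches the true depth of every key
theorem pv_fold_good (pm : PySem.Dict Int Int) (K : Nat)
    (hesc : ∀ n, pm.contains (pvIter pm K n) = false)
    (hne : ∀ k v, pm.get? k = some v → v ≠ k) :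
    ∀ (ks : List Int) (D : PySem.Dict Int Int), (∀ n ∈ ks, pm.contains n = true) → pvGood pm K D →
      pvGood pm K (ks.foldl (fun D node =>
        let ws := pvWalk pm D (K + 1) node []
        pvCache D (D.getD ws.2 0) ws.1.reverse) D) ∧
      (∀ m, m ∈ ks ∨ D.contains m = true →
        (ks.foldl (fun D node =>
          let ws := pvWalk pm D (K + 1) node []
          pvCache D (D.getD ws.2 0) ws.1.reverse) D).contains m = true) := by
  intro ks
  induction ks with
  | nil =>
    intro D _ hG
    refine ⟨hG, ?_⟩
    intro m hm
    rcases hm with hm | hm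
    · cases hm
    · simpa using hm
  | cons node rest ih =>
    intro D hks hG
    have hproc := pv_process_good pm K hesc hne D node hG
    have hstep : (fun D node =>
        let ws := pvWalk pm D (K + 1) node []
        pvCache D (D.getD ws.2 0) ws.1.reverse) D node
        = pvCache D (D.getD (pvStop pm D (K + 1) node) 0) (pvPath pm D (K + 1) node).reverse := by
      simp [pv_walk_eq]
    simp only [List.foldl_cons, hstep]
    have hrec := ih _ (fun n hn => hks n (List.mem_cons_of_mem _ hn)) hproc.1
    refine ⟨hrec.1, ?_⟩
    intro m hm
    rcases hm with hm | hm
    · rcases List.mem_cons.1 hm with rfl | hm'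
      · exact hrec.2 m (Or.inr (hproc.2 m (Or.inl ⟨hks m (List.mem_cons_self), rfl⟩)))
      · exact hrec.2 m (Or.inl hm')
    · exact hrec.2 m (Or.inr (hproc.2 m (Or.inr hm)))

-- sorted with keys that agree on the list's members
theorem pv_insertBy_congr {α : Type} (p q : α → α → Bool) (x : α) (ys : List α)
    (h : ∀ y ∈ ys, p x y = q x y) : PySem.List.insertBy p x ys = PySem.List.insertBy q x ys := by
  induction ys with
  | nil => rfl
  | cons y ys ih =>
    simp only [PySem.List.insertBy]
    rw [h y (List.mem_cons_self)]
    split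
    · rfl
    · rw [ih (fun y' hy' => h y' (List.mem_cons_of_mem _ hy'))]

theorem pv_sorted_rev_congr {α : Type} (k1 k2 : α → Int) (xs : List α)
    (h : ∀ y ∈ xs, k1 y = k2 y) :
    PySem.List.sorted xs k1 true = PySem.List.sorted xs k2 true := by
  rw [PySem.List.sorted_rev_eq_foldl_insertBy, PySem.List.sorted_rev_eq_foldl_insertBy]
  have main : ∀ (l : List α) (acc : List α), (∀ y ∈ l, k1 y = k2 y) → (∀ y ∈ acc, k1 y = k2 y) →
      l.foldl (fun acc x => PySem.List.insertBy (fun a b => decide (k1 b < k1 a)) x acc) acc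
      = l.foldl (fun acc x => PySem.List.insertBy (fun a b => decide (k2 b < k2 a)) x acc) acc := by
    intro l
    induction l with
    | nil => intro acc _ _; rfl
    | cons x l ih =>
      intro acc hl hacc
      have hx := hl x (List.mem_cons_self)
      simp only [List.foldl_cons]
      rw [pv_insertBy_congr _ _ x acc (fun y hy => by rw [hx, hacc y hy])]
      refine ih _ (fun y hy => hl y (List.mem_cons_of_mem _ hy)) ?_
      intro y hy
      rcases (PySem.List.mem_insertBy _ x y acc).1 hy with rfl | hy'
      · exact hx
      · exact hacc y hy'
  exact main xs [] h (by intro y hy; cases hy)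

-- ===== VERDICT (by name: the statement is the Claim_ definition above) =====
theorem sort_bottom_up_spec : Claim_equal_sort_bottom_up := by
  intro pairs _ hpre
  unfold Spec_sort_bottom_up sort_bottom_up sort_bottom_up_alt
  have hpm : pvParentB pairs = pvParentA pairs := rfl
  have hpmPre : pvParentPre pairs = pvParentA pairs := rfl
  set pm := pvParentA pairs with hpmdef
  set K := pairs.length with hK
  rw [hpm]
  have hne : ∀ k v, pm.get? k = some v → v ≠ k := by
    refine pv_parent_ne pairs PySem.Dict.empty ?_
    intro k v h; rw [PySem.Dict.get?_empty] at h; cases h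
  have hesc : ∀ n, pm.contains (pvIter pm K n) = false := by
    intro n
    by_cases hc : pm.contains n = true
    · have hk : n ∈ (pvParentPre pairs).keys := by
        rw [hpmPre]
        exact (PySem.Dict.contains_iff_mem_keys pm n).1 hc
      have := hpre n hk
      rwa [hpmPre] at this
    · have hf : pm.contains n = false := by
        revert hc; cases pm.contains n <;> simp
      rwa [pv_iter_fix pm K n hf]
  have hfold := pv_fold_good pm K hesc hne pm.keys PySem.Dict.empty
    (fun n hn => (PySem.Dict.contains_iff_mem_keys pm n).2 hn)
    (fun k v h => by rw [PySem.Dict.get?_empty] at h; cases h)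
  set Dfin := pm.keys.foldl (fun D node =>
    let ws := pvWalk pm D (K + 1) node []
    pvCache D (D.getD ws.2 0) ws.1.reverse) PySem.Dict.empty with hDfin
  refine (pv_sorted_rev_congr _ _ _ ?_).symm
  intro y hy
  have hmem := List.mem_filter.1 hy
  have hne2 : y.1 ≠ y.2 := by simpa using hmem.2
  have hcy : pm.contains y.2 = true :=
    pv_parent_contains pairs y PySem.Dict.empty (Or.inl ⟨hmem.1, hne2⟩)
  have hcfin : Dfin.contains y.2 = true :=
    hfold.2 y.2 (Or.inl ((PySem.Dict.contains_iff_mem_keys pm y.2).1 hcy))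
  rw [PySem.Dict.contains_eq_isSome_get?] at hcfin
  rcases Option.isSome_iff_exists.1 hcfin with ⟨v, hv⟩
  rw [PySem.Dict.getD_eq_get?_getD, hv]
  simpa using hfold.1 y.2 v hv
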